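-- pv_equiv track=rewrite | github.com/PROGRAMMINinGPYTHON/minilogia | OIJ_olimpiada_konkurs/dwukrotnosc_sumy_cyfr.py | calosc
-- ===== SOURCE A (Python) =====
-- def calosc(n, a):
--     for j in range(n - 1):
--         suma = 0
--         while a > 0:
--             suma += a % 10
--             a //= 10
--         a = suma * 2
--     return a
-- ===== SOURCE B (Python) =====
-- def calosc(n, a):
--     steps = n - 1
--     if steps <= 0:
--         return a
--     seq = []
--     cur = a
--     while len(seq) < steps and cur not in seq:
--         seq.append(cur)
--         s = 0
--         x = cur
--         while x > 0:
--             s += x % 10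
--             x //= 10
--         cur = 2 * s
--     if len(seq) == steps:
--         return cur
--     start = seq.index(cur)
--     period = len(seq) - start
--     return seq[start + (steps - start) % period]
-- ===== Notes on version B (the rewrite author's own statement) =====
-- stated objective: faster
-- what changed: Instead of performing all n-1 digit-sum-doubling iterations, B records the sequence of values until it repeats (the orbit enters a short cycle quickly) and jumps to the answer by modular indexing into the recorded prefix.
import Mathlib
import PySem

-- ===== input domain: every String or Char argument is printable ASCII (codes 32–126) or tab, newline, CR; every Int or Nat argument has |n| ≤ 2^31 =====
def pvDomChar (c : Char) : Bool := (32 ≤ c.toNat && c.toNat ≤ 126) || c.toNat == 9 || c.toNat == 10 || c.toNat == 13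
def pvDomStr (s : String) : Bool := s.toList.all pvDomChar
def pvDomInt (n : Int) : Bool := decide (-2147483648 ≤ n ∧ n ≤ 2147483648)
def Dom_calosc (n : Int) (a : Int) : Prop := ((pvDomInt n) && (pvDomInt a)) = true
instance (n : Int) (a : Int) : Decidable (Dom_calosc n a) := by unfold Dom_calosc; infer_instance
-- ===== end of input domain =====

-- B replaces the n-1 explicit iterations of a ↦ 2*digitsum(a) by recording the orbit until a
-- value repeats and jumping to the answer by modular indexing into the recorded prefix (faster
-- in a timing run: O(log a + cycle) instead of O(n log a)).

-- ===== PORT A =====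
-- inner 'while a > 0: suma += a % 10; a //= 10' loop (identical in both sources)
def digitLoop (a : Int) (suma : Int) : Int :=
  if h : 0 < a then
    digitLoop (PySem.Int.floordiv a 10) (suma + PySem.Int.mod a 10)
  else suma
termination_by a.toNat
decreasing_by
  rw [PySem.Int.floordiv_eq_ediv_of_pos (by norm_num)]
  omega

def calosc (n : Int) (a : Int) : Int :=
  (PySem.List.pyRange 0 (n - 1) 1).foldl (fun a _ => digitLoop a 0 * 2) a

-- ===== PORT B =====
-- the 'while len(seq) < steps and cur not in seq' loop; fuel = steps - len(seq)
def loopB (fuel : Nat) (seq : List Int) (cur : Int) : List Int × Int :=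
  match fuel with
  | 0 => (seq, cur)
  | fuel + 1 =>
    if seq.contains cur then (seq, cur)
    else loopB fuel (seq ++ [cur]) (2 * digitLoop cur 0)

def calosc_alt (n : Int) (a : Int) : Int :=
  let steps := n - 1
  if steps ≤ 0 then a
  else
    let p := loopB steps.toNat [] a
    if (p.1.length : Int) = steps then p.2
    else
      -- seq.index(cur): cur ∈ seq here, so index? is some; .getD 0 only totalises
      let start : Int := ((PySem.List.index? p.1 p.2).getD 0 : Nat)
      let period : Int := (p.1.length : Int) - start
      -- seq[start + (steps - start) % period]: index provably in range; .getD 0 only totalises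
      (PySem.List.pyGet? p.1 (start + PySem.Int.mod (steps - start) period)).getD 0

-- ===== PRECONDITION & SPEC =====
def Spec_calosc (n : Int) (a : Int) (out : Int) : Prop := out = calosc_alt n a
instance (n : Int) (a : Int) (out : Int) : Decidable (Spec_calosc n a out) := by unfold Spec_calosc; infer_instance

-- ===== CLAIM (what is proved, stated in full; the proofs are below) =====
def Claim_equal_calosc : Prop := ∀ (n : Int) (a : Int), Dom_calosc n a → Spec_calosc n a (calosc n a)

-- ===== LEMMAS AND PROOFS =====

-- one step of the outer loop
def pvStep (x : Int) : Int := digitLoop x 0 * 2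

lemma pvStep_comm (x : Int) : 2 * digitLoop x 0 = pvStep x := by
  unfold pvStep; ring

-- A's fold over a range of length L is L-fold iteration of pvStep
lemma foldl_const_step (l : List Int) (a : Int) :
    l.foldl (fun x _ => digitLoop x 0 * 2) a = pvStep^[l.length] a := by
  induction l generalizing a with
  | nil => rfl
  | cons x xs ih =>
      simp [List.foldl_cons, ih, Function.iterate_succ_apply, pvStep]

lemma calosc_eq_iterate (n a : Int) : calosc n a = pvStep^[(n - 1).toNat] a := by
  unfold calosc
  rw [foldl_const_step]
  congr 1
  rw [PySem.List.length_pyRange_one]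
  omega

-- periodicity: once the orbit repeats, iterates reduce modulo the period
lemma iterate_mod (a : Int) (k p : Nat) (hp : 0 < p)
    (hrep : pvStep^[k + p] a = pvStep^[k] a) :
    ∀ m : Nat, pvStep^[m + k] a = pvStep^[m % p + k] a := by
  intro m
  induction m using Nat.strong_induction_on with
  | _ m ih =>
    by_cases hm : m < p
    · rw [Nat.mod_eq_of_lt hm]
    · push_neg at hm
      have h1 : m + k = (m - p) + (k + p) := by omega
      have h2 : pvStep^[m + k] a = pvStep^[(m - p) + k] a := by
        rw [h1, Function.iterate_add_apply, hrep, ← Function.iterate_add_apply]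
      rw [h2, ih (m - p) (by omega), Nat.mod_eq_sub_mod hm]

-- invariant of loopB
lemma loopB_inv (a : Int) :
    ∀ (fuel : Nat) (seq : List Int) (cur : Int),
      (∀ j (hj : j < seq.length), seq[j] = pvStep^[j] a) →
      cur = pvStep^[seq.length] a →
      (∀ j (hj : j < (loopB fuel seq cur).1.length),
          (loopB fuel seq cur).1[j] = pvStep^[j] a) ∧
      (loopB fuel seq cur).2 = pvStep^[(loopB fuel seq cur).1.length] a ∧
      (loopB fuel seq cur).1.length ≤ seq.length + fuel ∧
      ((loopB fuel seq cur).1.length = seq.length + fuel ∨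
        (loopB fuel seq cur).2 ∈ (loopB fuel seq cur).1) := by
  intro fuel
  induction fuel with
  | zero =>
      intro seq cur hseq hcur
      simp only [loopB]
      exact ⟨hseq, hcur, by omega, Or.inl (by omega)⟩
  | succ fuel ih =>
      intro seq cur hseq hcur
      show _ ∧ _
      rw [loopB]
      by_cases hc : seq.contains cur = true
      · rw [if_pos hc]
        exact ⟨hseq, hcur, Nat.le_add_right _ _, Or.inr (by simpa using hc)⟩
      · rw [if_neg hc]
        have hseq' : ∀ j (hj : j < (seq ++ [cur]).length),
            (seq ++ [cur])[j] = pvStep^[j] a := by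
          intro j hj
          simp only [List.length_append, List.length_singleton] at hj
          by_cases hjl : j < seq.length
          · rw [List.getElem_append_left hjl]; exact hseq j hjl
          · have : j = seq.length := by omega
            subst this
            simp [hcur]
        have hcur' : 2 * digitLoop cur 0 = pvStep^[(seq ++ [cur]).length] a := by
          rw [pvStep_comm, hcur]
          simp [← Function.iterate_succ_apply' pvStep seq.length a]
        obtain ⟨h1, h2, h3, h4⟩ := ih (seq ++ [cur]) (2 * digitLoop cur 0) hseq' hcur'
        refine ⟨h1, h2, ?_, ?_⟩
        · simp only [List.length_append, List.length_singleton] at h3; omega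
        · rcases h4 with h | h
          · left; simp only [List.length_append, List.length_singleton] at h; omega
          · right; exact h

-- ===== VERDICT (by name: the statement is the Claim_ definition above) =====
theorem calosc_spec : Claim_equal_calosc := by
  intro n a _
  unfold Spec_calosc
  rw [calosc_eq_iterate]
  unfold calosc_alt
  by_cases hs : n - 1 ≤ 0
  · simp only [hs, if_true]
    have : (n - 1).toNat = 0 := by omega
    rw [this]; rfl
  · simp only [hs, if_false]
    push_neg at hs
    set S : Nat := (n - 1).toNat with hS
    have hSn : (S : Int) = n - 1 := by omega
    obtain ⟨h1, h2, h3, h4⟩ := loopB_inv a S [] a (by simp) (by simp)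
    set p := loopB S [] a with hp
    simp only [List.length_nil, Nat.zero_add] at h3 h4
    by_cases hlen : (p.1.length : Int) = n - 1
    · simp only [hlen, if_true]
      rw [h2]
      congr 1
      omega
    · simp only [hlen, if_false]
      have hmem : p.2 ∈ p.1 := by
        rcases h4 with h | h
        · exact absurd (by omega : (p.1.length : Int) = n - 1) hlen
        · exact h
      have hlt : p.1.length < S := by omega
      obtain ⟨k, hk⟩ := Option.isSome_iff_exists.mp
        ((PySem.List.index?_isSome_iff p.1 p.2).mpr hmem)
      obtain ⟨hkl, hkv, _⟩ := PySem.List.getElem_of_index?_eq_some hk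
      -- repeat: pvStep^[len] a = pvStep^[k] a
      have hrep : pvStep^[k + (p.1.length - k)] a = pvStep^[k] a := by
        have : k + (p.1.length - k) = p.1.length := by omega
        rw [this, ← h2, ← hkv, h1 k hkl]
      set per : Nat := p.1.length - k with hper
      have hper0 : 0 < per := by omega
      have hmod := iterate_mod a k per hper0 hrep (S - k)
      -- the computed index
      have hidx : (((PySem.List.index? p.1 p.2).getD 0 : Nat) : Int) = (k : Int) := by
        rw [hk]; rfl
      rw [hidx]
      have hmodeq : PySem.Int.mod ((n - 1) - (k : Int)) ((p.1.length : Int) - (k : Int))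
          = (((S - k) % per : Nat) : Int) := by
        rw [PySem.Int.mod_eq_emod_of_pos (by omega)]
        have e1 : (n - 1) - (k : Int) = ((S - k : Nat) : Int) := by omega
        have e2 : (p.1.length : Int) - (k : Int) = ((per : Nat) : Int) := by omega
        rw [e1, e2, ← Int.natCast_emod]
      rw [hmodeq]
      have hidxNat : (k : Int) + (((S - k) % per : Nat) : Int)
          = ((k + (S - k) % per : Nat) : Int) := by push_cast; ring
      rw [hidxNat]
      have hinrange : k + (S - k) % per < p.1.length := by
        have := Nat.mod_lt (S - k) hper0
        omega
      rw [PySem.List.pyGet?_natCast, List.getElem?_eq_getElem hinrange]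
      simp only [Option.getD_some]
      rw [h1 _ hinrange]
      rw [Nat.add_comm, ← hmod]
      congr 1
      omega
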